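-- pv_equiv track=rewrite | github.com/osmandapp/OsmAnd-tools | python/turn_lanes/turn_lanes_analyzer.py | _activation_penalty_from_indexes
-- ===== SOURCE A (Python) =====
-- def _activation_penalty_from_indexes(expected_lane_indexes: list[int] | None, predicted_lane_indexes: list[int] | None, lanes_count: int) -> tuple[int, int]:
--     if expected_lane_indexes is None:
--         return 0, 0
--     if predicted_lane_indexes is None:
--         return 1, 0
--     if lanes_count <= 0:
--         return 0, 0
--
--     expected_active = [False] * lanes_count
--     for idx in expected_lane_indexes:
--         if 0 <= idx < lanes_count:
--             expected_active[idx] = True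
--
--     predicted_active = [False] * lanes_count
--     for idx in predicted_lane_indexes:
--         if 0 <= idx < lanes_count:
--             predicted_active[idx] = True
--
--     distance = 0
--     if (lanes_count % 2) == 1:
--         center_index = (lanes_count - 1) // 2
--         for idx, (exp_active, pred_active) in enumerate(zip(expected_active, predicted_active, strict=True)):
--             if exp_active ^ pred_active:
--                 distance += abs(idx - center_index)
--     else:
--         center_times2 = lanes_count - 1
--         for idx, (exp_active, pred_active) in enumerate(zip(expected_active, predicted_active, strict=True)):
--             if exp_active ^ pred_active:
--                 distance += abs((2 * idx) - center_times2)
--     return 0, int(distance)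
-- ===== SOURCE B (Python) =====
-- def _activation_penalty_from_indexes(expected_lane_indexes, predicted_lane_indexes, lanes_count):
--     if expected_lane_indexes is None:
--         return 0, 0
--     if predicted_lane_indexes is None:
--         return 1, 0
--     if lanes_count <= 0:
--         return 0, 0
--
--     if (lanes_count % 2) == 1:
--         center = (lanes_count - 1) // 2
--         weight = lambda i: abs(i - center)
--     else:
--         weight = lambda i: abs(2 * i - (lanes_count - 1))
--
--     ev = sorted(i for i in expected_lane_indexes if 0 <= i < lanes_count)
--     pv = sorted(i for i in predicted_lane_indexes if 0 <= i < lanes_count)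
--
--     # two-pointer merge of the two sorted runs: add the weight of each lane
--     # index that occurs in exactly one run, skipping duplicate copies.
--     distance = 0
--     i = j = 0
--     le, lp = len(ev), len(pv)
--     while i < le or j < lp:
--         if j >= lp or (i < le and ev[i] < pv[j]):
--             x = ev[i]
--             distance += weight(x)
--             while i < le and ev[i] == x:
--                 i += 1
--         elif i >= le or pv[j] < ev[i]:
--             x = pv[j]
--             distance += weight(x)
--             while j < lp and pv[j] == x:
--                 j += 1
--         else:
--             x = ev[i]
--             while i < le and ev[i] == x:
--                 i += 1
--             while j < lp and pv[j] == x: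
--                 j += 1
--     return 0, distance
-- ===== Notes on version B (the rewrite author's own statement) =====
-- stated objective: alternative
-- what changed: Replaces A's two boolean activation arrays and the full lanes_count-length enumerate(zip(...)) scan by sorting the in-range index lists and a duplicate-skipping two-pointer merge that adds the weight of each index found in exactly one run.
import Mathlib
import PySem

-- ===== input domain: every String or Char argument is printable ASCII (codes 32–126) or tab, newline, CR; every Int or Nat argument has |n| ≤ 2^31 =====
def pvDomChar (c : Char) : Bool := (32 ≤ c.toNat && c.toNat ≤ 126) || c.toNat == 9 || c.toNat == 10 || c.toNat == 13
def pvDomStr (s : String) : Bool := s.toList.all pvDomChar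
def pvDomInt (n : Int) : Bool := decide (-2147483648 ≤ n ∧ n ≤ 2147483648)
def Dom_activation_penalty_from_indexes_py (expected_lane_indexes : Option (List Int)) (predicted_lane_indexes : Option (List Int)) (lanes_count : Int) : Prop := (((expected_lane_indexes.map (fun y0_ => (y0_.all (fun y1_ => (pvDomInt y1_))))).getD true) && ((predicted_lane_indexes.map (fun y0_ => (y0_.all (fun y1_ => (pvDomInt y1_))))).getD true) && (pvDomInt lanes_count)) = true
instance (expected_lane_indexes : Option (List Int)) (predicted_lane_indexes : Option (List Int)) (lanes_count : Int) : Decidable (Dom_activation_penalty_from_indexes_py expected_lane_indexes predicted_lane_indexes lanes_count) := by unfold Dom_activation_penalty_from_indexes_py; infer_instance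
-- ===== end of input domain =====

-- B replaces A's two boolean activation arrays and full lanes_count scan by sorting the
-- in-range index lists and a duplicate-skipping two-pointer merge summing the weight of
-- each index present in exactly one run (objective: alternative).


-- ===== PORT A =====
-- the '[False] * lanes_count' array filled by 'for idx in idxs: if 0 <= idx < lanes_count: arr[idx] = True'
-- (used for both the expected and the predicted loop, which are textually identical in A)
def pvFillActive (idxs : List Int) (lanes_count : Int) : List Bool :=
  idxs.foldl
    (fun arr idx =>
      if 0 ≤ idx ∧ idx < lanes_count then PySem.List.pySetD arr idx true else arr)
    (List.replicate lanes_count.toNat false)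

def activation_penalty_from_indexes_py (expected_lane_indexes : Option (List Int)) (predicted_lane_indexes : Option (List Int)) (lanes_count : Int) : Int × Int :=
  match expected_lane_indexes with
  | none => (0, 0)
  | some el =>
    match predicted_lane_indexes with
    | none => (1, 0)
    | some pl =>
      if lanes_count ≤ 0 then (0, 0)
      else
        let expected_active := pvFillActive el lanes_count
        let predicted_active := pvFillActive pl lanes_count
        let distance : Int :=
          if PySem.Int.mod lanes_count 2 = 1 then
            let center_index := PySem.Int.floordiv (lanes_count - 1) 2
            (PySem.List.enumerate (expected_active.zip predicted_active) 0).foldl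
              (fun d x => if x.2.1 != x.2.2 then d + |x.1 - center_index| else d) 0
          else
            let center_times2 := lanes_count - 1
            (PySem.List.enumerate (expected_active.zip predicted_active) 0).foldl
              (fun d x => if x.2.1 != x.2.2 then d + |2 * x.1 - center_times2| else d) 0
        (0, distance)

-- ===== PORT B =====
-- B's while loop with pointers i, j: recursion on the two remaining suffixes; each inner
-- duplicate-skipping 'while' is a dropWhile of the equal copies.  The fuel argument is a
-- pure totality guard (the caller passes the total length, which bounds the iteration count).
def pvMergeW (w : Int → Int) : Nat → List Int → List Int → Int
  | _, [], [] => 0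
  | 0, _, _ => 0
  | fuel + 1, x :: xs, [] => w x + pvMergeW w fuel (xs.dropWhile (fun z => z == x)) []
  | fuel + 1, [], y :: ys => w y + pvMergeW w fuel [] (ys.dropWhile (fun z => z == y))
  | fuel + 1, x :: xs, y :: ys =>
    if x < y then w x + pvMergeW w fuel (xs.dropWhile (fun z => z == x)) (y :: ys)
    else if y < x then w y + pvMergeW w fuel (x :: xs) (ys.dropWhile (fun z => z == y))
    else pvMergeW w fuel (xs.dropWhile (fun z => z == x)) (ys.dropWhile (fun z => z == y))

def activation_penalty_from_indexes_py_alt (expected_lane_indexes : Option (List Int)) (predicted_lane_indexes : Option (List Int)) (lanes_count : Int) : Int × Int :=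
  match expected_lane_indexes with
  | none => (0, 0)
  | some el =>
    match predicted_lane_indexes with
    | none => (1, 0)
    | some pl =>
      if lanes_count ≤ 0 then (0, 0)
      else
        let weight : Int → Int :=
          if PySem.Int.mod lanes_count 2 = 1 then
            fun i => |i - PySem.Int.floordiv (lanes_count - 1) 2|
          else
            fun i => |2 * i - (lanes_count - 1)|
        let ev := PySem.List.sorted
          (el.filter (fun i => decide (0 ≤ i) && decide (i < lanes_count))) (fun x => x) false
        let pv := PySem.List.sorted
          (pl.filter (fun i => decide (0 ≤ i) && decide (i < lanes_count))) (fun x => x) false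
        (0, pvMergeW weight (ev.length + pv.length) ev pv)

-- ===== PRECONDITION & SPEC =====
def Spec_activation_penalty_from_indexes_py (expected_lane_indexes : Option (List Int)) (predicted_lane_indexes : Option (List Int)) (lanes_count : Int) (out : Int × Int) : Prop := out = activation_penalty_from_indexes_py_alt expected_lane_indexes predicted_lane_indexes lanes_count
instance (expected_lane_indexes : Option (List Int)) (predicted_lane_indexes : Option (List Int)) (lanes_count : Int) (out : Int × Int) : Decidable (Spec_activation_penalty_from_indexes_py expected_lane_indexes predicted_lane_indexes lanes_count out) := by unfold Spec_activation_penalty_from_indexes_py; infer_instance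

-- ===== CLAIM (what is proved, stated in full; the proofs are below) =====
def Claim_equal_activation_penalty_from_indexes_py : Prop := ∀ (expected_lane_indexes : Option (List Int)) (predicted_lane_indexes : Option (List Int)) (lanes_count : Int), Dom_activation_penalty_from_indexes_py expected_lane_indexes predicted_lane_indexes lanes_count → Spec_activation_penalty_from_indexes_py expected_lane_indexes predicted_lane_indexes lanes_count (activation_penalty_from_indexes_py expected_lane_indexes predicted_lane_indexes lanes_count)

-- ===== LEMMAS AND PROOFS =====

-- the fill loop preserves the array length
lemma pvFill_length (n : Int) (idxs : List Int) (arr : List Bool) :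
    (idxs.foldl
      (fun arr idx => if 0 ≤ idx ∧ idx < n then PySem.List.pySetD arr idx true else arr)
      arr).length = arr.length := by
  induction idxs generalizing arr with
  | nil => rfl
  | cons i t ih =>
    simp only [List.foldl_cons]
    by_cases h : 0 ≤ i ∧ i < n
    · rw [if_pos h, ih, PySem.List.pySetD_of_nonneg _ _ h.1, List.length_set]
    · rw [if_neg h, ih]

-- element k of the filled array: old value OR "some in-range idx equals k"
lemma pvFill_getD (n : Int) (idxs : List Int) (arr : List Bool) (k : Nat)
    (harr : arr.length = n.toNat) (hk : (k : Int) < n) :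
    (idxs.foldl
      (fun arr idx => if 0 ≤ idx ∧ idx < n then PySem.List.pySetD arr idx true else arr)
      arr).getD k false
    = (arr.getD k false ||
        idxs.any (fun i => decide (0 ≤ i) && decide (i < n) && decide (i = (k : Int)))) := by
  induction idxs generalizing arr with
  | nil => simp
  | cons i t ih =>
    simp only [List.foldl_cons, List.any_cons]
    by_cases h : 0 ≤ i ∧ i < n
    · rw [if_pos h, PySem.List.pySetD_of_nonneg _ _ h.1,
        ih (arr.set i.toNat true) (by rw [List.length_set]; exact harr)]
      by_cases hik : i = (k : Int)
      · have hik' : i.toNat = k := by omega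
        have hset : (arr.set i.toNat true).getD k false = true := by
          rw [hik', List.getD_eq_getElem?_getD,
            List.getElem?_set_self (by omega : k < arr.length)]
          rfl
        have hcond : (decide (0 ≤ i) && decide (i < n) && decide (i = (k : Int))) = true := by
          simp only [hik, Bool.and_eq_true, decide_eq_true_eq]
          refine ⟨⟨?_, ?_⟩, trivial⟩ <;> omega
        rw [hset, Bool.true_or, hcond, Bool.true_or, Bool.or_true]
      · have hne : i.toNat ≠ k := by omega
        have hset : (arr.set i.toNat true).getD k false = arr.getD k false := by
          rw [List.getD_eq_getElem?_getD, List.getElem?_set_ne hne, List.getD_eq_getElem?_getD]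
        have hcond : decide (i = (k : Int)) = false := by simp [hik]
        rw [hset, hcond, Bool.and_false, Bool.false_or]
    · rw [if_neg h, ih arr harr]
      have : (decide (0 ≤ i) && decide (i < n) && decide (i = (k : Int))) = false := by
        simp only [Bool.and_eq_false_iff, decide_eq_false_iff_not]
        by_cases h0 : 0 ≤ i
        · exact Or.inl (Or.inr (fun hlt => h ⟨h0, hlt⟩))
        · exact Or.inl (Or.inl h0)
      rw [this, Bool.false_or]

-- the "any" test is membership in the filtered list of in-range indexes
lemma pvAny_mem (n : Int) (idxs : List Int) (x : Int) :
    idxs.any (fun i => decide (0 ≤ i) && decide (i < n) && decide (i = x))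
    = decide (x ∈ idxs.filter (fun i => decide (0 ≤ i) && decide (i < n))) := by
  rw [Bool.eq_iff_iff]
  simp only [List.any_eq_true, Bool.and_eq_true, decide_eq_true_eq, List.mem_filter]
  constructor
  · rintro ⟨i, hi, ⟨h0, h1⟩, rfl⟩
    exact ⟨hi, h0, h1⟩
  · rintro ⟨hx, h0, h1⟩
    exact ⟨x, hx, ⟨h0, h1⟩, rfl⟩

-- A's enumerate-over-zip fold as a Finset.range sum
lemma pvFoldEnum (w : Int → Int) (xs : List (Bool × Bool)) (s d : Int) :
    (PySem.List.enumerate xs s).foldl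
      (fun d x => if x.2.1 != x.2.2 then d + w x.1 else d) d
    = d + ∑ k ∈ Finset.range xs.length,
        (if (xs.getD k (false, false)).1 != (xs.getD k (false, false)).2
         then w (s + (k : Int)) else 0) := by
  induction xs generalizing s d with
  | nil => simp [PySem.List.enumerate_nil]
  | cons x t ih =>
    rw [PySem.List.enumerate_cons, List.foldl_cons, List.length_cons, Finset.sum_range_succ']
    simp only [List.getD_cons_zero, List.getD_cons_succ]
    rw [ih (s + 1) (if x.1 != x.2 then d + w s else d)]
    have hc : ∀ k : Nat, s + 1 + (k : Int) = s + (((k : Nat) + 1 : Nat) : Int) := by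
      intro k; push_cast; ring
    rw [Finset.sum_congr rfl (fun k _ => by rw [hc k])]
    by_cases hxb : x.1 != x.2
    · rw [if_pos hxb, if_pos hxb]
      simp only [Nat.cast_zero, add_zero]
      ring
    · rw [if_neg hxb, if_neg hxb]
      simp only [add_zero]

-- sum over range of an Int-cast indicator = sum over the Finset, when it lies in [0, n)
lemma pvSumCast (n : Nat) (D : Finset ℤ) (w : ℤ → ℤ) (hD : ∀ x ∈ D, 0 ≤ x ∧ x < (n : Int)) :
    ∑ k ∈ Finset.range n, (if (k : Int) ∈ D then w k else 0) = ∑ x ∈ D, w x := by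
  have himg : ((Finset.range n).filter (fun k : ℕ => ((k : ℤ) ∈ D : Prop))).image
      (Nat.cast : ℕ → ℤ) = D := by
    ext x
    simp only [Finset.mem_image, Finset.mem_filter, Finset.mem_range]
    constructor
    · rintro ⟨k, ⟨_, hk⟩, rfl⟩; exact hk
    · intro hx
      obtain ⟨h0, hlt⟩ := hD x hx
      exact ⟨x.toNat, ⟨by omega, by rwa [Int.toNat_of_nonneg h0]⟩, Int.toNat_of_nonneg h0⟩
  conv_rhs => rw [← himg, Finset.sum_image (fun a _ b _ h => Int.natCast_inj.mp h)]
  rw [← Finset.sum_filter]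

-- A side: the distance fold = weight sum over the symmetric difference of the
-- in-range index Finsets
lemma pvAside (w : Int → Int) (el pl : List Int) (n : Int) (hn : 0 < n) :
    (PySem.List.enumerate ((pvFillActive el n).zip (pvFillActive pl n)) 0).foldl
      (fun d x => if x.2.1 != x.2.2 then d + w x.1 else d) 0
    = ∑ z ∈ ((el.filter (fun i => decide (0 ≤ i) && decide (i < n))).toFinset \
             (pl.filter (fun i => decide (0 ≤ i) && decide (i < n))).toFinset ∪
             (pl.filter (fun i => decide (0 ≤ i) && decide (i < n))).toFinset \
             (el.filter (fun i => decide (0 ≤ i) && decide (i < n))).toFinset), w z := by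
  set fe := el.filter (fun i => decide (0 ≤ i) && decide (i < n)) with hfe
  set fp := pl.filter (fun i => decide (0 ≤ i) && decide (i < n)) with hfp
  set D : Finset ℤ := fe.toFinset \ fp.toFinset ∪ fp.toFinset \ fe.toFinset with hD
  have hmemE : ∀ x ∈ fe, 0 ≤ x ∧ x < n := by
    intro x hx
    rw [hfe, List.mem_filter] at hx
    have := hx.2; simp only [Bool.and_eq_true, decide_eq_true_eq] at this; exact this
  have hmemP : ∀ x ∈ fp, 0 ≤ x ∧ x < n := by
    intro x hx
    rw [hfp, List.mem_filter] at hx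
    have := hx.2; simp only [Bool.and_eq_true, decide_eq_true_eq] at this; exact this
  have hla : (pvFillActive el n).length = n.toNat := by
    unfold pvFillActive; rw [pvFill_length, List.length_replicate]
  have hlb : (pvFillActive pl n).length = n.toNat := by
    unfold pvFillActive; rw [pvFill_length, List.length_replicate]
  have hlz : ((pvFillActive el n).zip (pvFillActive pl n)).length = n.toNat := by
    rw [List.length_zip, hla, hlb, min_self]
  rw [pvFoldEnum, hlz, zero_add]
  have hstep : ∀ k ∈ Finset.range n.toNat,
      (if (((pvFillActive el n).zip (pvFillActive pl n)).getD k (false, false)).1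
          != (((pvFillActive el n).zip (pvFillActive pl n)).getD k (false, false)).2
       then w ((0 : Int) + (k : Int)) else 0)
      = (if (k : Int) ∈ D then w k else 0) := by
    intro k hk
    rw [Finset.mem_range] at hk
    have hkz : k < ((pvFillActive el n).zip (pvFillActive pl n)).length := by omega
    have hkn : (k : Int) < n := by omega
    have hA : (pvFillActive el n).getD k false = decide ((k : Int) ∈ fe) := by
      unfold pvFillActive
      rw [pvFill_getD n el (List.replicate n.toNat false) k (by simp) hkn, pvAny_mem,
        List.getD_replicate, Bool.false_or, hfe]
      exact hk
    have hB : (pvFillActive pl n).getD k false = decide ((k : Int) ∈ fp) := by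
      unfold pvFillActive
      rw [pvFill_getD n pl (List.replicate n.toNat false) k (by simp) hkn, pvAny_mem,
        List.getD_replicate, Bool.false_or, hfp]
      exact hk
    have hz : ((pvFillActive el n).zip (pvFillActive pl n)).getD k (false, false)
        = ((pvFillActive el n).getD k false, (pvFillActive pl n).getD k false) := by
      have h1 : k < (pvFillActive el n).length := by rw [hla]; exact hk
      have h2 : k < (pvFillActive pl n).length := by rw [hlb]; exact hk
      rw [List.getD_eq_getElem _ _ hkz, List.getElem_zip,
        List.getD_eq_getElem _ _ h1, List.getD_eq_getElem _ _ h2]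
    rw [hz, hA, hB, zero_add]
    by_cases he : (k : Int) ∈ fe <;> by_cases hp : (k : Int) ∈ fp <;>
      simp [he, hp, hD, Finset.mem_union, Finset.mem_sdiff, List.mem_toFinset]
  rw [Finset.sum_congr rfl hstep, pvSumCast n.toNat D w]
  intro x hx
  simp only [hD, Finset.mem_union, Finset.mem_sdiff, List.mem_toFinset] at hx
  rcases hx with ⟨h1, _⟩ | ⟨h1, _⟩
  · have := hmemE x h1; omega
  · have := hmemP x h1; omega

-- proof-side twin of pvMergeW without the fuel argument (well-founded recursion)
def pvMergeR (w : Int → Int) : List Int → List Int → Int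
  | [], [] => 0
  | x :: xs, [] => w x + pvMergeR w (xs.dropWhile (fun z => z == x)) []
  | [], y :: ys => w y + pvMergeR w [] (ys.dropWhile (fun z => z == y))
  | x :: xs, y :: ys =>
    if x < y then w x + pvMergeR w (xs.dropWhile (fun z => z == x)) (y :: ys)
    else if y < x then w y + pvMergeR w (x :: xs) (ys.dropWhile (fun z => z == y))
    else pvMergeR w (xs.dropWhile (fun z => z == x)) (ys.dropWhile (fun z => z == y))
termination_by xs ys => xs.length + ys.length
decreasing_by
  · have := List.length_dropWhile_le (fun z => z == x) xs; simp at *; omega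
  · have := List.length_dropWhile_le (fun z => z == y) ys; simp at *; omega
  · have := List.length_dropWhile_le (fun z => z == x) xs; simp at *; omega
  · have := List.length_dropWhile_le (fun z => z == y) ys; simp at *; omega
  · have h1 := List.length_dropWhile_le (fun z => z == x) xs
    have h2 := List.length_dropWhile_le (fun z => z == y) ys
    simp at *; omega

-- the duplicate skip erases exactly the copies of x
lemma pvDW_toFinset (x : Int) (xs : List Int) (hp : xs.Pairwise (· ≤ ·))
    (hb : ∀ z ∈ xs, x ≤ z) :
    (xs.dropWhile (fun z => z == x)).toFinset = xs.toFinset.erase x := by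
  induction xs with
  | nil => simp [List.dropWhile]
  | cons a t ih =>
    by_cases ha : a = x
    · rw [List.dropWhile_cons_of_pos (by simp [ha]),
        ih hp.tail (fun u hu => hb u (List.mem_cons_of_mem a hu))]
      subst ha
      ext z
      simp only [Finset.mem_erase, List.mem_toFinset, List.mem_cons]
      tauto
    · rw [List.dropWhile_cons_of_neg (by simp [ha])]
      have hxa : x < a := lt_of_le_of_ne (hb a List.mem_cons_self) (Ne.symm ha)
      have hnx : x ∉ a :: t := by
        intro hmem
        rcases List.mem_cons.mp hmem with h | hzt
        · omega
        · have := (List.pairwise_cons.mp hp).1 x hzt; omega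
      rw [Finset.erase_eq_self.mpr (by simpa using hnx)]

-- duplicate skip preserves sortedness
lemma pvDW_pairwise (x : Int) (xs : List Int) (hp : xs.Pairwise (· ≤ ·)) :
    (xs.dropWhile (fun z => z == x)).Pairwise (· ≤ ·) :=
  hp.sublist (List.dropWhile_sublist _)

-- pulling one element out of a Finset sum
lemma pvInsErase (x : Int) (s : Finset Int) : insert x s = insert x (s.erase x) := by
  ext z
  by_cases hz : z = x <;> simp [hz]

-- B's merge computes the weight sum over the symmetric difference of the two Finsets
lemma pvMergeR_eq (w : Int → Int) (xs ys : List Int)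
    (hxs : xs.Pairwise (· ≤ ·)) (hys : ys.Pairwise (· ≤ ·)) :
    pvMergeR w xs ys
      = ∑ z ∈ (xs.toFinset \ ys.toFinset ∪ ys.toFinset \ xs.toFinset), w z := by
  revert hxs hys
  induction xs, ys using pvMergeR.induct with
  | case1 =>
    intro _ _
    simp [pvMergeR]
  | case2 x xs ih =>
    intro hxs _
    have hb := (List.pairwise_cons.mp hxs).1
    rw [pvMergeR, ih (pvDW_pairwise x xs hxs.tail) List.Pairwise.nil,
      pvDW_toFinset x xs hxs.tail hb]
    simp only [List.toFinset_nil, Finset.sdiff_empty, Finset.empty_sdiff,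
      Finset.union_empty, List.toFinset_cons]
    rw [pvInsErase x xs.toFinset, Finset.sum_insert (Finset.notMem_erase x xs.toFinset)]
  | case3 y ys ih =>
    intro _ hys
    have hb := (List.pairwise_cons.mp hys).1
    rw [pvMergeR, ih List.Pairwise.nil (pvDW_pairwise y ys hys.tail),
      pvDW_toFinset y ys hys.tail hb]
    simp only [List.toFinset_nil, Finset.sdiff_empty, Finset.empty_sdiff,
      Finset.empty_union, List.toFinset_cons]
    rw [pvInsErase y ys.toFinset, Finset.sum_insert (Finset.notMem_erase y ys.toFinset)]
  | case4 x xs y ys hlt ih =>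
    intro hxs hys
    have hbx := (List.pairwise_cons.mp hxs).1
    have hby := (List.pairwise_cons.mp hys).1
    have hxB : x ∉ y :: ys := by
      intro hmem
      rcases List.mem_cons.mp hmem with h | hzt
      · omega
      · have := hby x hzt; omega
    rw [pvMergeR, if_pos hlt, ih (pvDW_pairwise x xs hxs.tail) hys,
      pvDW_toFinset x xs hxs.tail hbx]
    have hset : (x :: xs).toFinset \ (y :: ys).toFinset ∪
        (y :: ys).toFinset \ (x :: xs).toFinset
        = insert x (xs.toFinset.erase x \ (y :: ys).toFinset ∪
          (y :: ys).toFinset \ xs.toFinset.erase x) := by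
      ext z
      by_cases hz : z = x
      · subst hz
        simp [Finset.mem_union, Finset.mem_sdiff, List.mem_toFinset]
        exact ⟨fun h => hxB (by simp [h]), fun h => hxB (List.mem_cons_of_mem _ h)⟩
      · simp only [Finset.mem_insert, Finset.mem_union, Finset.mem_sdiff,
          Finset.mem_erase, List.mem_toFinset, List.toFinset_cons, hz,
          false_or]
        tauto
    rw [hset, Finset.sum_insert]
    simp only [Finset.mem_union, Finset.mem_sdiff, Finset.mem_erase, List.mem_toFinset]
    intro hmem
    rcases hmem with ⟨⟨h1, _⟩, _⟩ | ⟨h1, _⟩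
    · exact h1 rfl
    · exact hxB (List.mem_toFinset.mp (List.mem_toFinset.mpr h1))
  | case5 x xs y ys hnlt hlt ih =>
    intro hxs hys
    have hbx := (List.pairwise_cons.mp hxs).1
    have hby := (List.pairwise_cons.mp hys).1
    have hyA : y ∉ x :: xs := by
      intro hmem
      rcases List.mem_cons.mp hmem with h | hzt
      · omega
      · have := hbx y hzt; omega
    rw [pvMergeR, if_neg hnlt, if_pos hlt, ih hxs (pvDW_pairwise y ys hys.tail),
      pvDW_toFinset y ys hys.tail hby]
    have hset : (x :: xs).toFinset \ (y :: ys).toFinset ∪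
        (y :: ys).toFinset \ (x :: xs).toFinset
        = insert y ((x :: xs).toFinset \ ys.toFinset.erase y ∪
          ys.toFinset.erase y \ (x :: xs).toFinset) := by
      ext z
      by_cases hz : z = y
      · subst hz
        simp [Finset.mem_union, Finset.mem_sdiff, List.mem_toFinset]
        exact ⟨fun h => hyA (by simp [h]), fun h => hyA (List.mem_cons_of_mem _ h)⟩
      · simp only [Finset.mem_insert, Finset.mem_union, Finset.mem_sdiff,
          Finset.mem_erase, List.mem_toFinset, List.toFinset_cons, hz,
          false_or]
        tauto
    rw [hset, Finset.sum_insert]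
    simp only [Finset.mem_union, Finset.mem_sdiff, Finset.mem_erase, List.mem_toFinset]
    intro hmem
    rcases hmem with ⟨h1, _⟩ | ⟨⟨h1, _⟩, _⟩
    · exact hyA h1
    · exact h1 rfl
  | case6 x xs y ys hnlt hngt ih =>
    intro hxs hys
    have hxy : x = y := by omega
    subst hxy
    have hbx := (List.pairwise_cons.mp hxs).1
    have hby := (List.pairwise_cons.mp hys).1
    rw [pvMergeR, if_neg hnlt, if_neg hngt,
      ih (pvDW_pairwise x xs hxs.tail) (pvDW_pairwise x ys hys.tail),
      pvDW_toFinset x xs hxs.tail hbx, pvDW_toFinset x ys hys.tail hby]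
    congr 1
    ext z
    by_cases hz : z = x
    · subst hz
      simp [Finset.mem_union, Finset.mem_sdiff]
    · simp only [Finset.mem_union, Finset.mem_sdiff, Finset.mem_erase,
        List.mem_toFinset, List.mem_cons, hz, false_or, ne_eq, not_false_eq_true, true_and]

-- enough fuel: the ported merge equals its fuel-free twin
lemma pvMergeW_fuel (w : Int → Int) (xs ys : List Int) :
    ∀ fuel, xs.length + ys.length ≤ fuel → pvMergeW w fuel xs ys = pvMergeR w xs ys := by
  induction xs, ys using pvMergeR.induct with
  | case1 =>
    intro fuel _
    cases fuel <;> simp [pvMergeW, pvMergeR]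
  | case2 x xs ih =>
    intro fuel hf
    cases fuel with
    | zero => simp at hf
    | succ f =>
      have hd := List.length_dropWhile_le (fun z => z == x) xs
      rw [pvMergeW, pvMergeR, ih f (by simp at hf ⊢; omega)]
  | case3 y ys ih =>
    intro fuel hf
    cases fuel with
    | zero => simp at hf
    | succ f =>
      have hd := List.length_dropWhile_le (fun z => z == y) ys
      rw [pvMergeW, pvMergeR, ih f (by simp at hf ⊢; omega)]
  | case4 x xs y ys hlt ih =>
    intro fuel hf
    cases fuel with
    | zero => simp at hf
    | succ f =>
      have hd := List.length_dropWhile_le (fun z => z == x) xs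
      rw [pvMergeW, pvMergeR, if_pos hlt, if_pos hlt, ih f (by simp at hf ⊢; omega)]
  | case5 x xs y ys hnlt hlt ih =>
    intro fuel hf
    cases fuel with
    | zero => simp at hf
    | succ f =>
      have hd := List.length_dropWhile_le (fun z => z == y) ys
      rw [pvMergeW, pvMergeR, if_neg hnlt, if_neg hnlt, if_pos hlt, if_pos hlt,
        ih f (by simp at hf ⊢; omega)]
  | case6 x xs y ys hnlt hngt ih =>
    intro fuel hf
    cases fuel with
    | zero => simp at hf
    | succ f =>
      have h1 := List.length_dropWhile_le (fun z => z == x) xs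
      have h2 := List.length_dropWhile_le (fun z => z == y) ys
      rw [pvMergeW, pvMergeR, if_neg hnlt, if_neg hnlt, if_neg hngt, if_neg hngt,
        ih f (by simp at hf ⊢; omega)]

-- sorting does not change the underlying Finset
lemma pvSortedToFinset (l : List Int) :
    (PySem.List.sorted l (fun x => x) false).toFinset = l.toFinset := by
  ext z
  simp [List.mem_toFinset, PySem.List.mem_sorted]

-- sorted output is Pairwise ≤
lemma pvSortedPairwise (l : List Int) :
    (PySem.List.sorted l (fun x => x) false).Pairwise (· ≤ ·) := by
  have := PySem.List.sorted_pairwise (xs := l) (key := fun x => x)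
  exact this

-- the common core: A's distance fold = B's sorted two-pointer merge
lemma pvMain (w : Int → Int) (el pl : List Int) (n : Int) (hn : 0 < n) :
    (PySem.List.enumerate ((pvFillActive el n).zip (pvFillActive pl n)) 0).foldl
      (fun d x => if x.2.1 != x.2.2 then d + w x.1 else d) 0
    = pvMergeW w
        ((PySem.List.sorted (el.filter (fun i => decide (0 ≤ i) && decide (i < n))) (fun x => x) false).length +
         (PySem.List.sorted (pl.filter (fun i => decide (0 ≤ i) && decide (i < n))) (fun x => x) false).length)
        (PySem.List.sorted (el.filter (fun i => decide (0 ≤ i) && decide (i < n))) (fun x => x) false)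
        (PySem.List.sorted (pl.filter (fun i => decide (0 ≤ i) && decide (i < n))) (fun x => x) false) := by
  rw [pvAside w el pl n hn, pvMergeW_fuel w _ _ _ le_rfl,
    pvMergeR_eq w _ _ (pvSortedPairwise _) (pvSortedPairwise _),
    pvSortedToFinset, pvSortedToFinset]

-- ===== VERDICT (by name: the statement is the Claim_ definition above) =====
theorem activation_penalty_from_indexes_py_spec : Claim_equal_activation_penalty_from_indexes_py := by
  intro e p n _
  unfold Spec_activation_penalty_from_indexes_py
  rcases e with _ | el
  · rfl
  · rcases p with _ | pl
    · rfl
    · show activation_penalty_from_indexes_py (some el) (some pl) n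
        = activation_penalty_from_indexes_py_alt (some el) (some pl) n
      simp only [activation_penalty_from_indexes_py, activation_penalty_from_indexes_py_alt]
      by_cases hn : n ≤ 0
      · rw [if_pos hn, if_pos hn]
      · have hpos : 0 < n := by omega
        rw [if_neg hn, if_neg hn]
        by_cases hm : PySem.Int.mod n 2 = 1
        · rw [if_pos hm, if_pos hm]
          exact congrArg (Prod.mk 0)
            (pvMain (fun i => |i - PySem.Int.floordiv (n - 1) 2|) el pl n hpos)
        · rw [if_neg hm, if_neg hm]
          exact congrArg (Prod.mk 0)
            (pvMain (fun i => |2 * i - (n - 1)|) el pl n hpos)
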